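-- pv_equiv track=rewrite | github.com/ismailakkila/bip39 | bip39_helper.py | num_groups_2
-- ===== SOURCE A (Python) =====
-- def num_groups_2(payload):
--     """This function returns the a list of 24 numbers representing the payload"""
--     num_groups = []
--     read_count = 0
--     num = 0
--     for byte in payload:
--         bit = 0
--         while bit < 8:
--             bit_enabled = byte & 128 == 128
--             read_count += 1
--             bit += 1
--             if bit_enabled:
--                 num += 2 ** (11 - read_count)
--             byte = byte << 1 & 255
--             if read_count == 11:
--                 num_groups.append(num)
--                 read_count = 0
--                 num = 0
--
--     return num_groups
-- ===== SOURCE B (Python) =====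
-- def num_groups_2(payload):
--     """This function returns the a list of 24 numbers representing the payload"""
--     groups = []
--     acc = 0
--     nbits = 0
--     for byte in payload:
--         acc = (acc << 8) | (byte & 255)
--         nbits += 8
--         while nbits >= 11:
--             nbits -= 11
--             groups.append((acc >> nbits) & 0x7FF)
--             acc &= (1 << nbits) - 1
--     return groups
-- ===== Notes on version B (the rewrite author's own statement) =====
-- stated objective: faster
-- what changed: B streams each byte into a small shift-register (acc = acc<<8 | byte&255) and emits every complete 11-bit group by one shift-and-mask, instead of A's per-bit inner loop that tests the top bit, rotates the byte and accumulates weighted powers of two; the leftover <11 bits in the register are simply never emitted, matching A's dropping of a trailing partial group.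
import Mathlib
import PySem

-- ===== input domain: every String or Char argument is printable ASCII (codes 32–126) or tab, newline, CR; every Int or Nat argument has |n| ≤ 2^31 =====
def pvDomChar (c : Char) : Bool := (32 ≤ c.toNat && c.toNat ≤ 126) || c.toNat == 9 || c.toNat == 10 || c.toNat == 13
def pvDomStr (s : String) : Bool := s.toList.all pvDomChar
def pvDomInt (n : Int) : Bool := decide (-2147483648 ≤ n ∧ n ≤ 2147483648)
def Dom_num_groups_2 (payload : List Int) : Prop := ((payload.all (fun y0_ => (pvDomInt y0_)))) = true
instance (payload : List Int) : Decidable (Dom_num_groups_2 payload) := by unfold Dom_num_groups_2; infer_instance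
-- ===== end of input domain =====

-- B replaces A's per-bit inner loop with a byte-fed shift-register from which each
-- complete 11-bit group is emitted by one shift-and-mask (objective: faster, constant factor).

-- ===== PORT A =====
-- Inner `while bit < 8` loop of A, one recursive step per bit; `read_count` is kept as a
-- Nat because in A it only ever holds 0..11 (it is reset upon reaching 11), so Python's
-- `2 ** (11 - read_count)` is exactly `(2 : Int) ^ (11 - read_count : Nat)`.
def numA_inner (fuel : Nat) (byte : Int) (groups : List Int) (read_count : Nat) (num : Int) :
    List Int × Nat × Int :=
  match fuel with
  | 0 => (groups, read_count, num)
  | f + 1 =>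
    let bit_enabled : Bool := PySem.Int.band byte 128 == 128
    let read_count := read_count + 1
    let num := if bit_enabled then num + 2 ^ (11 - read_count) else num
    let byte := PySem.Int.band (byte <<< (1 : Nat)) 255
    if read_count = 11 then numA_inner f byte (groups ++ [num]) 0 0
    else numA_inner f byte groups read_count num

def num_groups_2 (payload : List Int) : List Int :=
  (payload.foldl (fun (st : List Int × Nat × Int) byte =>
      numA_inner 8 byte st.1 st.2.1 st.2.2) ([], 0, 0)).1

-- ===== PORT B =====
-- B's `while nbits >= 11` loop: it terminates because nbits strictly decreases.
-- `nbits` is kept as a Nat because in B it only ever holds nonnegative values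
-- (it starts at 0, grows by 8 and shrinks by 11 only while it is ≥ 11).
def emitLoop (groups : List Int) (acc : Int) (nbits : Nat) : List Int × Int × Nat :=
  if h : 11 ≤ nbits then
    let nbits' := nbits - 11
    emitLoop (groups ++ [PySem.Int.band (acc >>> nbits') 2047])
      (PySem.Int.band acc (((1 : Int) <<< nbits') - 1)) nbits'
  else (groups, acc, nbits)
termination_by nbits
decreasing_by omega

def num_groups_2_alt (payload : List Int) : List Int :=
  (payload.foldl (fun (st : List Int × Int × Nat) byte =>
      emitLoop st.1 (PySem.Int.bor (st.2.1 <<< (8 : Nat)) (PySem.Int.band byte 255)) (st.2.2 + 8))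
    ([], 0, 0)).1

-- ===== PRECONDITION & SPEC =====
def Spec_num_groups_2 (payload : List Int) (out : List Int) : Prop := out = num_groups_2_alt payload
instance (payload : List Int) (out : List Int) : Decidable (Spec_num_groups_2 payload out) := by unfold Spec_num_groups_2; infer_instance

-- ===== CLAIM (what is proved, stated in full; the proofs are below) =====
def Claim_equal_num_groups_2 : Prop := ∀ (payload : List Int), Dom_num_groups_2 payload → Spec_num_groups_2 payload (num_groups_2 payload)

-- ===== LEMMAS AND PROOFS =====

-- the low byte of an Int, as Python's `byte & 255` computes it
def cVal (b : Int) : Nat := (b % 256).toNat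

-- the sequence of the 8 bit tests A's inner loop performs on a byte
def byteTests : Nat → Int → List Bool
  | 0, _ => []
  | f + 1, b => (PySem.Int.band b 128 == 128) :: byteTests f (PySem.Int.band (b <<< (1 : Nat)) 255)

-- A's loop re-expressed on the stream of bits
def bitFold : List Bool → List Int → Nat → Int → List Int × Nat × Int
  | [], g, rc, n => (g, rc, n)
  | b :: bs, g, rc, n =>
    let rc' := rc + 1
    let n' := if b then n + 2 ^ (11 - rc') else n
    if rc' = 11 then bitFold bs (g ++ [n']) 0 0 else bitFold bs g rc' n'

-- MSB-first value of a bit list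
def valAux (a : Nat) (bs : List Bool) : Nat := bs.foldl (fun x b => 2 * x + b.toNat) a

def extract (m k v : Nat) : List Int :=
  (List.range k).map (fun j => ((v / 2 ^ (m - 11 * (j + 1)) % 2048 : Nat) : Int))

lemma cVal_lt (b : Int) : cVal b < 256 := by
  show (b % 256).toNat < 256
  omega

set_option maxRecDepth 10000 in
lemma byteCompl : ∀ r : Fin 256, 128 - ((r : Nat) &&& 128) = (255 - (r : Nat)) &&& 128 := by
  decide

lemma and255 (m : Nat) : m &&& 255 = m % 256 := by
  have := Nat.and_two_pow_sub_one_eq_mod m 8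
  norm_num at this
  exact this

lemma and128_mod (m : Nat) : m &&& 128 = (m % 256) &&& 128 := by
  have h1 : (128 : Nat) = 255 &&& 128 := rfl
  conv_lhs => rw [h1]
  rw [← Nat.and_assoc, and255]

lemma band255 (b : Int) : PySem.Int.band b 255 = ((cVal b : Nat) : Int) := by
  unfold PySem.Int.band cVal
  by_cases h : 0 ≤ b
  · rw [if_pos h, if_pos (by norm_num : (0 : Int) ≤ 255)]
    rw [show ((255 : Int).toNat) = 255 from rfl, and255]
    omega
  · rw [if_neg h, if_pos (by norm_num : (0 : Int) ≤ 255)]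
    rw [show ((255 : Int).toNat) = 255 from rfl, Nat.and_comm, and255]
    omega

lemma band128 (b : Int) : PySem.Int.band b 128 = PySem.Int.band ((cVal b : Nat) : Int) 128 := by
  have hrhs : PySem.Int.band ((cVal b : Nat) : Int) 128 = ((cVal b &&& 128 : Nat) : Int) := by
    exact_mod_cast PySem.Int.band_natCast (cVal b) 128
  rw [hrhs]
  unfold PySem.Int.band
  by_cases h : 0 ≤ b
  · rw [if_pos h, if_pos (by norm_num : (0 : Int) ≤ 128)]
    rw [show ((128 : Int).toNat) = 128 from rfl]
    rw [and128_mod b.toNat]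
    have : b.toNat % 256 = cVal b := by unfold cVal; omega
    rw [this]
  · rw [if_neg h, if_pos (by norm_num : (0 : Int) ≤ 128)]
    rw [show ((128 : Int).toNat) = 128 from rfl]
    set n := (-b - 1).toNat with hn
    have hc : cVal b = 255 - n % 256 := by unfold cVal; omega
    rw [Nat.and_comm 128 n, and128_mod n, hc]
    have := byteCompl ⟨n % 256, Nat.mod_lt _ (by norm_num)⟩
    simp only at this
    omega

lemma bandShift (b : Int) :
    PySem.Int.band (b <<< (1 : Nat)) 255 = PySem.Int.band (((cVal b : Nat) : Int) <<< (1 : Nat)) 255 := by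
  rw [band255, band255, Int.shiftLeft_eq, Int.shiftLeft_eq]
  unfold cVal
  norm_num
  omega

lemma byteTests_cVal (f : Nat) (b : Int) : byteTests f b = byteTests f ((cVal b : Nat) : Int) := by
  cases f with
  | zero => rfl
  | succ f =>
    simp only [byteTests]
    rw [band128 b, bandShift b]

set_option maxRecDepth 10000 in
lemma byteTests_val_byte : ∀ c : Fin 256,
    valAux 0 (byteTests 8 ((c : Nat) : Int)) = (c : Nat) ∧ (byteTests 8 ((c : Nat) : Int)).length = 8 := by
  decide

lemma numA_inner_eq_bitFold (f : Nat) (b : Int) (g : List Int) (rc : Nat) (n : Int) :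
    numA_inner f b g rc n = bitFold (byteTests f b) g rc n := by
  induction f generalizing b g rc n with
  | zero => rfl
  | succ f ih =>
    simp only [numA_inner, byteTests, bitFold]
    split <;> apply ih

lemma bitFold_append (xs ys : List Bool) (g : List Int) (rc : Nat) (n : Int) :
    bitFold (xs ++ ys) g rc n =
      bitFold ys (bitFold xs g rc n).1 (bitFold xs g rc n).2.1 (bitFold xs g rc n).2.2 := by
  induction xs generalizing g rc n with
  | nil => rfl
  | cons b xs ih =>
    simp only [List.cons_append, bitFold]
    split <;> apply ih

lemma valAux_acc (bs : List Bool) (a : Nat) : valAux a bs = a * 2 ^ bs.length + valAux 0 bs := by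
  induction bs generalizing a with
  | nil => simp [valAux]
  | cons b bs ih =>
    simp only [valAux, List.foldl_cons, List.length_cons] at *
    rw [ih (2 * a + b.toNat), ih (2 * 0 + b.toNat), pow_succ]
    ring

lemma valAux_lt (bs : List Bool) : valAux 0 bs < 2 ^ bs.length := by
  induction bs with
  | nil => simp [valAux]
  | cons b bs ih =>
    have h := valAux_acc bs b.toNat
    have h2 : valAux 0 (b :: bs) = valAux b.toNat bs := by simp [valAux]
    rw [List.length_cons, pow_succ, h2, h]
    have hb : b.toNat ≤ 1 := Bool.toNat_le b
    have h3 : b.toNat * 2 ^ bs.length ≤ 2 ^ bs.length := by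
      calc b.toNat * 2 ^ bs.length ≤ 1 * 2 ^ bs.length := Nat.mul_le_mul_right _ hb
      _ = 2 ^ bs.length := one_mul _
    omega

lemma natOrAdd (a b : Nat) (h : b < 256) : (a * 256) ||| b = a * 256 + b := by
  apply Nat.eq_of_testBit_eq
  intro i
  rw [Nat.testBit_lor]
  rcases lt_or_ge i 8 with hi | hi
  · have h1 : (a * 256).testBit i = false := by
      have := Nat.testBit_mul_two_pow a i 8
      simp only [show (256:Nat) = 2^8 from rfl] at *
      rw [this]; simp; omega
    have h2 : (a * 256 + b).testBit i = b.testBit i := by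
      have := Nat.testBit_mod_two_pow (a * 256 + b) 8 i
      rw [show (a * 256 + b) % 2^8 = b by omega] at this
      simp [hi] at this; exact this.symm
    rw [h1, h2]; simp
  · obtain ⟨j, rfl⟩ : ∃ j, i = j + 8 := ⟨i - 8, by omega⟩
    have h1 : (a * 256).testBit (j + 8) = a.testBit j := by
      have := Nat.testBit_mul_two_pow a (j + 8) 8
      simp only [show (256:Nat) = 2^8 from rfl] at *
      rw [this]; simp
    have h2 : (a * 256 + b).testBit (j + 8) = a.testBit j := by
      have := Nat.testBit_div_two_pow (n := 8) (a * 256 + b) j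
      rw [show (a * 256 + b) / 2^8 = a by omega] at this
      exact this.symm
    have h3 : b.testBit (j + 8) = false := Nat.testBit_lt_two_pow (by
      calc b < 256 := h
      _ = 2^8 := rfl
      _ ≤ 2^(j+8) := Nat.pow_le_pow_right (by norm_num) (by omega))
    rw [h1, h2, h3]; simp

lemma extract_peel (L q v : Nat) (hq : q < 2048) (hv : v < 2 ^ L) :
    extract (11 + L) ((11 + L) / 11) (q * 2 ^ L + v) = ((q : Nat) : Int) :: extract L (L / 11) v := by
  have hk : (11 + L) / 11 = L / 11 + 1 := by omega
  rw [hk]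
  unfold extract
  rw [List.range_succ_eq_map]
  simp only [List.map_cons, List.map_map]
  congr 1
  · have h11 : 11 + L - 11 * (0 + 1) = L := by omega
    rw [h11]
    have hdiv : (q * 2 ^ L + v) / 2 ^ L = q := by
      rw [Nat.add_comm, Nat.add_mul_div_right _ _ (by positivity),
        Nat.div_eq_of_lt hv, Nat.zero_add]
    rw [hdiv, Nat.mod_eq_of_lt hq]
  · apply List.map_congr_left
    intro j hj
    have hjlt : j < L / 11 := List.mem_range.mp hj
    have hle : 11 * (j + 1) ≤ L := by omega
    simp only [Function.comp_apply, Nat.succ_eq_add_one]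
    have he : 11 + L - 11 * (j + 1 + 1) = L - 11 * (j + 1) := by omega
    rw [he]
    have hLe : 2 ^ L = 2 ^ (11 * (j + 1)) * 2 ^ (L - 11 * (j + 1)) := by
      rw [← pow_add]; congr 1; omega
    have hdiv : (q * 2 ^ L + v) / 2 ^ (L - 11 * (j + 1)) =
        v / 2 ^ (L - 11 * (j + 1)) + q * 2 ^ (11 * (j + 1)) := by
      rw [hLe, ← Nat.mul_assoc, Nat.add_comm,
        Nat.add_mul_div_right _ _ (by positivity)]
    rw [hdiv]
    have h2048 : q * 2 ^ (11 * (j + 1)) = (q * 2 ^ (11 * j)) * 2048 := by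
      rw [show 11 * (j + 1) = 11 * j + 11 by ring, pow_add]
      norm_num; ring
    rw [h2048, Nat.add_mul_mod_self_right]

-- MAIN: what A's bit loop produces from a mid-group state
lemma bitFold_extract : ∀ (bs : List Bool) (g : List Int) (rc p : Nat), rc < 11 → p < 2 ^ rc →
    (bitFold bs g rc ((p * 2 ^ (11 - rc) : Nat) : Int)).1 =
      g ++ extract (rc + bs.length) ((rc + bs.length) / 11) (p * 2 ^ bs.length + valAux 0 bs) := by
  intro bs
  induction bs with
  | nil =>
    intro g rc p h1 h2
    simp only [bitFold, List.length_nil, Nat.add_zero]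
    rw [Nat.div_eq_of_lt h1]
    simp [extract]
  | cons b bs ih =>
    intro g rc p h1 h2
    have hvcons : valAux 0 (b :: bs) = b.toNat * 2 ^ bs.length + valAux 0 bs := by
      have : valAux 0 (b :: bs) = valAux b.toNat bs := by simp [valAux]
      rw [this, valAux_acc]
    have hbI : b.toNat ≤ 1 := Bool.toNat_le b
    have hunfold : ∀ n : Int, bitFold (b :: bs) g rc n =
        if rc + 1 = 11 then bitFold bs (g ++ [if b then n + 2 ^ (11 - (rc + 1)) else n]) 0 0
        else bitFold bs g (rc + 1) (if b then n + 2 ^ (11 - (rc + 1)) else n) := by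
      intro n; rfl
    have hn' : (if b then ((p * 2 ^ (11 - rc) : Nat) : Int) + 2 ^ (11 - (rc + 1))
        else ((p * 2 ^ (11 - rc) : Nat) : Int)) =
        (((2 * p + b.toNat) * 2 ^ (11 - (rc + 1)) : Nat) : Int) := by
      obtain ⟨k, hk1, hk2⟩ : ∃ k, 11 - rc = k + 1 ∧ 11 - (rc + 1) = k :=
        ⟨11 - (rc + 1), by omega, rfl⟩
      rw [hk1, hk2, pow_succ]
      cases b <;>
        simp only [Bool.toNat_false, Bool.toNat_true, if_true, if_false, Bool.false_eq_true] <;>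
        push_cast <;> ring
    rw [hunfold, hn']
    by_cases hrc : rc + 1 = 11
    · have hrc10 : rc = 10 := by omega
      subst hrc10
      rw [if_pos hrc]
      have h0 : (((2 * p + b.toNat) * 2 ^ (11 - (10 + 1)) : Nat) : Int) =
          (((2 * p + b.toNat) : Nat) : Int) := by norm_num
      have hz : (0 : Int) = (((0 : Nat) * 2 ^ (11 - 0) : Nat) : Int) := by norm_num
      rw [h0, hz, ih (g ++ [((2 * p + b.toNat : Nat) : Int)]) 0 0 (by omega) (by norm_num)]
      rw [List.append_assoc]
      congr 1
      simp only [Nat.zero_add, Nat.zero_mul, List.length_cons]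
      rw [hvcons]
      have hq : 2 * p + b.toNat < 2048 := by
        have : p < 2 ^ 10 := h2
        omega
      have hW : p * 2 ^ (bs.length + 1) + (b.toNat * 2 ^ bs.length + valAux 0 bs) =
          (2 * p + b.toNat) * 2 ^ bs.length + valAux 0 bs := by
        rw [pow_succ]; ring
      have hm : 10 + (bs.length + 1) = 11 + bs.length := by omega
      rw [hm, hW, extract_peel bs.length (2 * p + b.toNat) (valAux 0 bs) hq (valAux_lt bs)]
      rfl
    · rw [if_neg hrc]
      rw [ih g (rc + 1) (2 * p + b.toNat) (by omega) (by rw [pow_succ]; omega)]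
      congr 1
      have hm : rc + 1 + bs.length = rc + (b :: bs).length := by simp; omega
      rw [hm]
      congr 1
      simp only [List.length_cons]
      rw [hvcons, pow_succ]
      ring

lemma length_byteTests (f : Nat) (b : Int) : (byteTests f b).length = f := by
  induction f generalizing b with
  | zero => rfl
  | succ f ih => simp [byteTests, ih]

lemma flatMap_val (p : List Int) (a : Nat) :
    valAux a (p.flatMap (byteTests 8)) = p.foldl (fun x b => x * 256 + cVal b) a := by
  induction p generalizing a with
  | nil => rfl
  | cons b p ih =>
    simp only [List.flatMap_cons, List.foldl_cons]
    have hb : valAux a (byteTests 8 b) = a * 256 + cVal b := by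
      rw [byteTests_cVal]
      have h1 : valAux 0 (byteTests 8 ((cVal b : Nat) : Int)) = cVal b :=
        (byteTests_val_byte ⟨cVal b, cVal_lt b⟩).1
      have h2 : (byteTests 8 ((cVal b : Nat) : Int)).length = 8 :=
        (byteTests_val_byte ⟨cVal b, cVal_lt b⟩).2
      rw [valAux_acc, h2, h1]
      norm_num
    have happ : valAux a (byteTests 8 b ++ p.flatMap (byteTests 8)) =
        valAux (valAux a (byteTests 8 b)) (p.flatMap (byteTests 8)) := by
      unfold valAux
      rw [List.foldl_append]
    rw [happ, hb, ih]

lemma length_flatMap_bits (p : List Int) : (p.flatMap (byteTests 8)).length = 8 * p.length := by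
  induction p with
  | nil => rfl
  | cons b p ih =>
    simp only [List.flatMap_cons, List.length_append, List.length_cons, length_byteTests, ih]
    omega

lemma foldA (p : List Int) : ∀ (g : List Int) (rc : Nat) (n : Int),
    List.foldl (fun (st : List Int × Nat × Int) byte => numA_inner 8 byte st.1 st.2.1 st.2.2)
        (g, rc, n) p = bitFold (p.flatMap (byteTests 8)) g rc n := by
  induction p with
  | nil => intro g rc n; rfl
  | cons b p ih =>
    intro g rc n
    simp only [List.foldl_cons, List.flatMap_cons]
    rw [numA_inner_eq_bitFold, bitFold_append]
    exact ih _ _ _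

lemma A_eq_extract (p : List Int) :
    num_groups_2 p = extract (8 * p.length) (8 * p.length / 11)
      (p.foldl (fun x b => x * 256 + cVal b) 0) := by
  unfold num_groups_2
  rw [foldA]
  rw [show (0 : Int) = (((0 : Nat) * 2 ^ (11 - 0) : Nat) : Int) from by norm_num]
  rw [bitFold_extract _ [] 0 0 (by omega) (by norm_num)]
  simp only [List.nil_append, Nat.zero_add, Nat.zero_mul, length_flatMap_bits]
  rw [flatMap_val]

lemma foldV_acc (p : List Int) (a : Nat) :
    p.foldl (fun x b => x * 256 + cVal b) a =
      a * 2 ^ (8 * p.length) + p.foldl (fun x b => x * 256 + cVal b) 0 := by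
  rw [← flatMap_val, valAux_acc, length_flatMap_bits, flatMap_val]

lemma foldV_lt (p : List Int) : p.foldl (fun x b => x * 256 + cVal b) 0 < 2 ^ (8 * p.length) := by
  rw [← flatMap_val, ← length_flatMap_bits]
  exact valAux_lt _

lemma emit_step (out : List Int) (a nb : Nat) (h : nb ≤ 18) :
    emitLoop out ((a : Nat) : Int) nb =
      if 11 ≤ nb then
        (out ++ [((a / 2 ^ (nb - 11) % 2048 : Nat) : Int)], ((a % 2 ^ (nb - 11) : Nat) : Int), nb - 11)
      else (out, ((a : Nat) : Int), nb) := by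
  by_cases h11 : 11 ≤ nb
  · rw [if_pos h11]
    rw [show emitLoop out ((a : Nat) : Int) nb =
      emitLoop (out ++ [PySem.Int.band (((a : Nat) : Int) >>> (nb - 11)) 2047])
        (PySem.Int.band ((a : Nat) : Int) (((1 : Int) <<< (nb - 11)) - 1)) (nb - 11)
      from by rw [emitLoop, dif_pos h11]]
    have hsh : ((a : Nat) : Int) >>> (nb - 11) = ((a >>> (nb - 11) : Nat) : Int) :=
      (Int.natCast_shiftRight _ _).symm
    have hem : PySem.Int.band (((a : Nat) : Int) >>> (nb - 11)) 2047 =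
        ((a / 2 ^ (nb - 11) % 2048 : Nat) : Int) := by
      rw [hsh, show PySem.Int.band ((a >>> (nb - 11) : Nat) : Int) 2047 =
        ((a >>> (nb - 11) &&& 2047 : Nat) : Int) from by exact_mod_cast PySem.Int.band_natCast _ 2047]
      rw [Nat.shiftRight_eq_div_pow]
      congr 1
      have hmask := Nat.and_two_pow_sub_one_eq_mod (a / 2 ^ (nb - 11)) 11
      norm_num at hmask
      exact hmask
    have hmk : ((1 : Int) <<< (nb - 11)) - 1 = ((2 ^ (nb - 11) - 1 : Nat) : Int) := by
      rw [Int.shiftLeft_eq]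
      have : (1 : Nat) ≤ 2 ^ (nb - 11) := Nat.one_le_two_pow
      push_cast [this]
      ring
    have hacc : PySem.Int.band ((a : Nat) : Int) (((1 : Int) <<< (nb - 11)) - 1) =
        ((a % 2 ^ (nb - 11) : Nat) : Int) := by
      rw [hmk, show PySem.Int.band ((a : Nat) : Int) ((2 ^ (nb - 11) - 1 : Nat) : Int) =
        ((a &&& (2 ^ (nb - 11) - 1) : Nat) : Int) from by exact_mod_cast PySem.Int.band_natCast _ _]
      rw [Nat.and_two_pow_sub_one_eq_mod]
    rw [hem, hacc, emitLoop, dif_neg (by omega : ¬ 11 ≤ nb - 11)]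
  · rw [if_neg h11, emitLoop, dif_neg h11]

lemma foldB_extract (p : List Int) : ∀ (out : List Int) (a nb : Nat), nb < 11 → a < 2 ^ nb →
    (p.foldl (fun (st : List Int × Int × Nat) byte =>
        emitLoop st.1 (PySem.Int.bor (st.2.1 <<< (8 : Nat)) (PySem.Int.band byte 255)) (st.2.2 + 8))
      (out, ((a : Nat) : Int), nb)).1 =
      out ++ extract (nb + 8 * p.length) ((nb + 8 * p.length) / 11)
        (p.foldl (fun x b => x * 256 + cVal b) a) := by
  induction p with
  | nil =>
    intro out a nb h1 h2
    simp only [List.foldl_nil, List.length_nil, Nat.mul_zero, Nat.add_zero]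
    rw [Nat.div_eq_of_lt h1]
    simp [extract]
  | cons b p ih =>
    intro out a nb h1 h2
    simp only [List.foldl_cons]
    have hstep : PySem.Int.bor (((a : Nat) : Int) <<< (8 : Nat)) (PySem.Int.band b 255) =
        ((a * 256 + cVal b : Nat) : Int) := by
      rw [band255, Int.shiftLeft_eq]
      rw [show ((a : Int) * 2 ^ 8) = (((a * 256 : Nat)) : Int) from by push_cast; ring]
      rw [show PySem.Int.bor ((((a * 256 : Nat)) : Int)) ((cVal b : Nat) : Int) =
        (((a * 256 ||| cVal b : Nat)) : Int) from by exact_mod_cast PySem.Int.bor_natCast _ _]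
      rw [natOrAdd _ _ (cVal_lt b)]
    have ha' : a * 256 + cVal b < 2 ^ (nb + 8) := by
      have hc := cVal_lt b
      have : a * 256 + cVal b < (a + 1) * 256 := by omega
      calc a * 256 + cVal b < (a + 1) * 256 := this
        _ ≤ 2 ^ nb * 256 := by
            have : a + 1 ≤ 2 ^ nb := h2
            exact Nat.mul_le_mul_right _ this
        _ = 2 ^ (nb + 8) := by rw [pow_add]; norm_num
    rw [hstep, emit_step _ _ _ (by omega)]
    by_cases hge : 11 ≤ nb + 8
    · rw [if_pos hge]
      set a' := a * 256 + cVal b with ha'def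
      set e := nb + 8 - 11 with hedef
      have he7 : e ≤ 7 := by omega
      rw [ih _ (a' % 2 ^ e) e (by omega) (Nat.mod_lt _ (by positivity))]
      rw [List.append_assoc]
      congr 1
      have hq : a' / 2 ^ e < 2048 := by
        have h2e : 2 ^ (nb + 8) = 2 ^ e * 2048 := by
          rw [show nb + 8 = e + 11 by omega, pow_add]
          norm_num
        rw [Nat.div_lt_iff_lt_mul (by positivity)]
        omega
      have hqmod : a' / 2 ^ e % 2048 = a' / 2 ^ e := Nat.mod_eq_of_lt hq
      have hW : p.foldl (fun x b => x * 256 + cVal b) a' =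
          (a' / 2 ^ e) * 2 ^ (e + 8 * p.length) +
            ((a' % 2 ^ e) * 2 ^ (8 * p.length) + p.foldl (fun x b => x * 256 + cVal b) 0) := by
        rw [foldV_acc p a']
        conv_lhs => rw [show a' = a' / 2 ^ e * 2 ^ e + a' % 2 ^ e
          from (Nat.div_add_mod' a' (2 ^ e)).symm]
        rw [pow_add]
        ring
      have hv : (a' % 2 ^ e) * 2 ^ (8 * p.length) + p.foldl (fun x b => x * 256 + cVal b) 0 <
          2 ^ (e + 8 * p.length) := by
        have h1' := foldV_lt p
        have h2' : a' % 2 ^ e < 2 ^ e := Nat.mod_lt _ (by positivity)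
        have : (a' % 2 ^ e) * 2 ^ (8 * p.length) ≤ (2 ^ e - 1) * 2 ^ (8 * p.length) :=
          Nat.mul_le_mul_right _ (by omega)
        rw [pow_add]
        have hpos : 0 < 2 ^ (8 * p.length) := by positivity
        calc (a' % 2 ^ e) * 2 ^ (8 * p.length) + p.foldl (fun x b => x * 256 + cVal b) 0
            < (a' % 2 ^ e) * 2 ^ (8 * p.length) + 2 ^ (8 * p.length) := by omega
          _ = (a' % 2 ^ e + 1) * 2 ^ (8 * p.length) := by ring
          _ ≤ 2 ^ e * 2 ^ (8 * p.length) := Nat.mul_le_mul_right _ (by omega)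
      have hm : nb + 8 * (b :: p).length = 11 + (e + 8 * p.length) := by
        simp only [List.length_cons]
        omega
      rw [hm, hW, hqmod, extract_peel (e + 8 * p.length) (a' / 2 ^ e) _ hq hv,
        foldV_acc p (a' % 2 ^ e)]
      rfl
    · rw [if_neg hge]
      rw [ih _ (a * 256 + cVal b) (nb + 8) (by omega) ha']
      congr 2 <;> simp only [List.length_cons] <;> omega

lemma B_eq_extract (p : List Int) :
    num_groups_2_alt p = extract (8 * p.length) (8 * p.length / 11)
      (p.foldl (fun x b => x * 256 + cVal b) 0) := by
  unfold num_groups_2_alt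
  rw [show ((0 : Int)) = (((0 : Nat)) : Int) from rfl]
  rw [foldB_extract p [] 0 0 (by omega) (by norm_num)]
  simp

-- ===== VERDICT (by name: the statement is the Claim_ definition above) =====
theorem num_groups_2_spec : Claim_equal_num_groups_2 := by
  intro payload _
  unfold Spec_num_groups_2
  rw [A_eq_extract, B_eq_extract]
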